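-- pv_equiv track=rewrite | github.com/paulklemstine/factor | lean/demo/New/OctonionFactoring/demos/quaternion_factoring.py | four_square_decomposition
-- ===== SOURCE A (Python) =====
-- import math
-- from typing import List, Tuple, Optional
--
-- def four_square_decomposition(n: int) -> Tuple[int, int, int, int]:
--     """Find a representation n = a² + b² + c² + d² by brute force."""
--     for a in range(int(math.isqrt(n)) + 1):
--         for b in range(int(math.isqrt(n - a*a)) + 1):
--             for c in range(int(math.isqrt(n - a*a - b*b)) + 1):
--                 rem = n - a*a - b*b - c*c
--                 if rem >= 0:
--                     d = int(math.isqrt(rem))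
--                     if d*d == rem:
--                         return (a, b, c, d)
--     return None
-- ===== SOURCE B (Python) =====
-- import math
--
-- def four_square_decomposition(n: int):
--     """Smallest-lexicographic n = a²+b²+c²+d² via a generic recursive search:
--     rec(m, k) = lexicographically first k-tuple of squares summing to m, or None."""
--     def rec(m, k):
--         r = math.isqrt(m)
--         if k == 1:
--             return (r,) if r * r == m else None
--         for t in range(r + 1):
--             rest = rec(m - t * t, k - 1)
--             if rest is not None:
--                 return (t,) + rest
--         return None
--     return rec(n, 4)
-- ===== Notes on version B (the rewrite author's own statement) =====
-- stated objective: simpler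
-- what changed: Replaces the three hand-written nested loops with one generic recursive helper rec(m,k) (first k-tuple of squares summing to m), so the depth-4 search is one short recursion instead of triply nested loops with repeated remainder arithmetic.
import Mathlib
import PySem

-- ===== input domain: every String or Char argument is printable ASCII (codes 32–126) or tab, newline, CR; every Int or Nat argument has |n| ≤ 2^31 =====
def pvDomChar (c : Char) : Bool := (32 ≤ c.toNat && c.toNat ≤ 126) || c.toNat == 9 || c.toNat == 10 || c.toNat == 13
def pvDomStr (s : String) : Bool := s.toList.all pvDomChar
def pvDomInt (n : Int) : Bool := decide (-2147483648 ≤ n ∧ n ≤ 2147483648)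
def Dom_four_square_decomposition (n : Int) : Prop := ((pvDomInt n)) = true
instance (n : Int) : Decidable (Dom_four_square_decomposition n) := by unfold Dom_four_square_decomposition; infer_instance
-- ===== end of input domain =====

-- B replaces A's three hand-written nested loops by one generic recursive helper
-- rec(m,k) = first k-tuple of squares summing to m (objective: simpler decomposition).
-- Both raise ValueError (math.isqrt of a negative) for n < 0, excluded by Pre_.

-- math.isqrt, exact for m ≥ 0 (negative arguments raise in Python and are outside Pre_)
def pyIsqrt (m : Int) : Int := (m.toNat.sqrt : Int)

-- ===== PORT A =====
-- the triple nested for-loop with early return, as first-some over the ranges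
def four_square_decomposition (n : Int) : Option (Int × Int × Int × Int) :=
  (PySem.List.pyRange 0 (pyIsqrt n + 1) 1).findSome? (fun a =>
    (PySem.List.pyRange 0 (pyIsqrt (n - a*a) + 1) 1).findSome? (fun b =>
      (PySem.List.pyRange 0 (pyIsqrt (n - a*a - b*b) + 1) 1).findSome? (fun c =>
        let rem := n - a*a - b*b - c*c
        if 0 ≤ rem then
          let d := pyIsqrt rem
          if d * d = rem then some (a, b, c, d) else none
        else none)))

-- ===== PORT B =====
-- B's variable-length tuple result is a List Int; the top level converts the
-- length-4 result to the product type (boundary conversion only).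
def fsdRec (m : Int) : Nat → Option (List Int)
  | 0 => none
  | 1 => let r := pyIsqrt m; if r * r = m then some [r] else none
  | (k+2) =>
      (PySem.List.pyRange 0 (pyIsqrt m + 1) 1).findSome? (fun t =>
        (fsdRec (m - t*t) (k+1)).map (fun rest => t :: rest))

def four_square_decomposition_alt (n : Int) : Option (Int × Int × Int × Int) :=
  match fsdRec n 4 with
  | some (a :: b :: c :: d :: _) => some (a, b, c, d)
  | _ => none

-- ===== PRECONDITION & SPEC =====
-- math.isqrt raises ValueError for negative input in both A and B
def Pre_four_square_decomposition (n : Int) : Prop := 0 ≤ n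
instance (n : Int) : Decidable (Pre_four_square_decomposition n) := by unfold Pre_four_square_decomposition; infer_instance
def pvWitness_four_square_decomposition : Int := 7

def Spec_four_square_decomposition (n : Int) (out : Option (Int × Int × Int × Int)) : Prop := out = four_square_decomposition_alt n
instance (n : Int) (out : Option (Int × Int × Int × Int)) : Decidable (Spec_four_square_decomposition n out) := by unfold Spec_four_square_decomposition; infer_instance

-- ===== CLAIM (what is proved, stated in full; the proofs are below) =====
def Claim_equal_four_square_decomposition : Prop := ∀ (n : Int), Dom_four_square_decomposition n → Pre_four_square_decomposition n → Spec_four_square_decomposition n (four_square_decomposition n)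

-- ===== LEMMAS AND PROOFS =====

-- first-some over the same list of candidates, with bodies equal up to a map
theorem findSome?_map_congr {α β γ : Type} (xs : List α) (f : α → Option β)
    (g : α → Option γ) (h : γ → β) (H : ∀ x ∈ xs, f x = (g x).map h) :
    xs.findSome? f = (xs.findSome? g).map h := by
  induction xs with
  | nil => simp
  | cons x xs ih =>
      have hx := H x (List.mem_cons_self)
      rw [List.findSome?_cons, List.findSome?_cons, hx]
      cases g x with
      | none => exact ih (fun y hy => H y (List.mem_cons_of_mem _ hy))
      | some v => simp

theorem sq_le_of_mem_range {m c : Int} (hm : 0 ≤ m)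
    (hc : c ∈ PySem.List.pyRange 0 (pyIsqrt m + 1) 1) : 0 ≤ c ∧ c * c ≤ m := by
  rw [PySem.List.mem_pyRange_one] at hc
  obtain ⟨h0, h1⟩ := hc
  refine ⟨h0, ?_⟩
  have hc' : c.toNat ≤ m.toNat.sqrt := by
    unfold pyIsqrt at h1; omega
  have := Nat.sqrt_le_sqrt (Nat.le_refl m.toNat)
  have hs : m.toNat.sqrt * m.toNat.sqrt ≤ m.toNat := by
    simpa [pow_two] using Nat.sqrt_le' m.toNat
  have hsq : c.toNat * c.toNat ≤ m.toNat :=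
    le_trans (Nat.mul_le_mul hc' hc') hs
  have hci : (c.toNat : Int) * (c.toNat : Int) ≤ (m.toNat : Int) := by exact_mod_cast hsq
  rw [Int.toNat_of_nonneg h0, Int.toNat_of_nonneg hm] at hci
  exact hci

-- level 2: A's innermost c-loop = fsdRec _ 2, mapped into the 4-tuple
theorem level2 (m a b : Int) (hm : 0 ≤ m) :
    ((PySem.List.pyRange 0 (pyIsqrt m + 1) 1).findSome? (fun c =>
        let rem := m - c*c
        if 0 ≤ rem then
          let d := pyIsqrt rem
          if d * d = rem then some (a, b, c, d) else none
        else none))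
    = (fsdRec m 2).map (fun l => (a, b, l.headD 0, l.tail.headD 0)) := by
  show _ = ((PySem.List.pyRange 0 (pyIsqrt m + 1) 1).findSome? (fun t =>
        (fsdRec (m - t*t) 1).map (fun rest => t :: rest))).map _
  rw [findSome?_map_congr _ _
      (fun t => (fsdRec (m - t*t) 1).map (fun rest => t :: rest))
      (fun l => (a, b, l.headD 0, l.tail.headD 0))]
  intro c hc
  obtain ⟨h0, hle⟩ := sq_le_of_mem_range hm hc
  have hrem : 0 ≤ m - c*c := by omega
  simp only [fsdRec, if_pos hrem]
  split <;> simp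

-- level 3: A's b-loop = fsdRec _ 3, mapped
theorem level3 (m a : Int) (hm : 0 ≤ m) :
    ((PySem.List.pyRange 0 (pyIsqrt m + 1) 1).findSome? (fun b =>
        (PySem.List.pyRange 0 (pyIsqrt (m - b*b) + 1) 1).findSome? (fun c =>
          let rem := m - b*b - c*c
          if 0 ≤ rem then
            let d := pyIsqrt rem
            if d * d = rem then some (a, b, c, d) else none
          else none)))
    = (fsdRec m 3).map (fun l => (a, l.headD 0, l.tail.headD 0, l.tail.tail.headD 0)) := by
  show _ = ((PySem.List.pyRange 0 (pyIsqrt m + 1) 1).findSome? (fun t =>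
        (fsdRec (m - t*t) 2).map (fun rest => t :: rest))).map _
  rw [findSome?_map_congr _ _
      (fun t => (fsdRec (m - t*t) 2).map (fun rest => t :: rest))
      (fun l => (a, l.headD 0, l.tail.headD 0, l.tail.tail.headD 0))]
  intro b hb
  obtain ⟨h0, hle⟩ := sq_le_of_mem_range hm hb
  have hrem : 0 ≤ m - b*b := by omega
  rw [level2 (m - b*b) a b hrem]
  rw [Option.map_map]
  rfl

-- level 4: A = fsdRec _ 4, mapped
theorem level4 (n : Int) (hn : 0 ≤ n) :
    four_square_decomposition n
    = (fsdRec n 4).map (fun l =>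
        (l.headD 0, l.tail.headD 0, l.tail.tail.headD 0, l.tail.tail.tail.headD 0)) := by
  unfold four_square_decomposition
  show _ = ((PySem.List.pyRange 0 (pyIsqrt n + 1) 1).findSome? (fun t =>
        (fsdRec (n - t*t) 3).map (fun rest => t :: rest))).map _
  rw [findSome?_map_congr _ _
      (fun t => (fsdRec (n - t*t) 3).map (fun rest => t :: rest))
      (fun l => (l.headD 0, l.tail.headD 0, l.tail.tail.headD 0, l.tail.tail.tail.headD 0))]
  intro a ha
  obtain ⟨h0, hle⟩ := sq_le_of_mem_range hn ha
  have hrem : 0 ≤ n - a*a := by omega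
  rw [level3 (n - a*a) a hrem]
  rw [Option.map_map]
  rfl

-- any successful fsdRec result has length k
theorem fsdRec_length (k : Nat) (m : Int) (l : List Int)
    (h : fsdRec m k = some l) : l.length = k := by
  induction k generalizing m l with
  | zero => simp [fsdRec] at h
  | succ k ih =>
      match k with
      | 0 =>
          simp only [fsdRec] at h
          split at h
          · cases h; rfl
          · cases h
      | k+1 =>
          simp only [fsdRec] at h
          obtain ⟨t, _, ht⟩ := List.exists_of_findSome?_eq_some h
          cases hr : fsdRec (m - t*t) (k+1) with
          | none => rw [hr] at ht; simp at ht
          | some rest =>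
              rw [hr] at ht
              simp only [Option.map_some] at ht
              cases ht
              simp [ih _ _ hr]

-- ===== VERDICT (by name: the statement is the Claim_ definition above) =====
theorem four_square_decomposition_spec : Claim_equal_four_square_decomposition := by
  intro n _ hpre
  unfold Spec_four_square_decomposition four_square_decomposition_alt
  rw [level4 n hpre]
  cases h : fsdRec n 4 with
  | none => rfl
  | some l =>
      have hlen := fsdRec_length 4 n l h
      match l, hlen with
      | [a, b, c, d], _ => rfl
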